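-- pv_equiv track=rewrite | github.com/Ali-Mones/Intro-to-AI-Labs | Lab_2/tests/gen_tests.py | get_col_index
-- ===== SOURCE A (Python) =====
-- def get_col_index(board: list[list[int]]):
--     col_index = [0 for _ in range(len(board[0]))]
--     for col in range(len(board[0])):
--         row = 0
--         while row < len(board) and board[row][col] == 2:
--             row += 1
--         col_index[col] = 6 - row
--
--     return col_index
-- ===== SOURCE B (Python) =====
-- def get_col_index(board: list[list[int]]):
--     n = len(board[0])
--     counts = [0] * n
--     active = list(range(n))
--     for row in board:
--         if not active:
--             break
--         nxt = []
--         for c in active: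
--             if row[c] == 2:
--                 counts[c] += 1
--                 nxt.append(c)
--         active = nxt
--     return [6 - k for k in counts]
-- ===== Notes on version B (the rewrite author's own statement) =====
-- stated objective: alternative
-- what changed: Column-major per-column while-loops replaced by a single row-major pass maintaining per-column counts and an active-column frontier that shrinks at each column's first non-2 and stops the scan once empty.
import Mathlib
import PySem

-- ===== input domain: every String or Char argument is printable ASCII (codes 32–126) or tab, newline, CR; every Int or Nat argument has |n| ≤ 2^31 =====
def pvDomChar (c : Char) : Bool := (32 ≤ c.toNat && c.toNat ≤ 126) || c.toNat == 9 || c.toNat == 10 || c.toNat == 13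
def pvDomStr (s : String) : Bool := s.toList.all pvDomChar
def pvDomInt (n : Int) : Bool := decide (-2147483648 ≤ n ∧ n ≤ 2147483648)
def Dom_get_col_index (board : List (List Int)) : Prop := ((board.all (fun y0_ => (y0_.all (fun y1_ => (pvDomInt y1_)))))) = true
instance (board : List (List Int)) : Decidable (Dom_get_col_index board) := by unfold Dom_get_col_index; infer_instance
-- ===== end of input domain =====

-- B replaces A's per-column while-loops by one row-major pass with a shrinking active-column
-- frontier (alternative decomposition, same asymptotic cost, early exit when all columns stopped).

-- ===== PORT A =====
-- the inner 'while row < len(board) and board[row][col] == 2: row += 1' loop of A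
def pvAWhile (board : List (List Int)) (col : Nat) (row : Nat) : Nat :=
  if h : row < board.length ∧ (board.getD row []).getD col 0 = 2 then
    pvAWhile board col (row + 1)
  else row
termination_by board.length - row
decreasing_by omega

def get_col_index (board : List (List Int)) : List Int :=
  -- col_index = [0]*len(board[0]); for col in range(len(board[0])): … col_index[col] = 6 - row
  (List.range (board.headD []).length).map (fun col => (6 : Int) - (pvAWhile board col 0 : Int))

-- ===== PORT B =====
-- body of 'for c in active: if row[c] == 2: counts[c] += 1; nxt.append(c)'
def pvBStep (r : List Int) (p : List Int × List Nat) (c : Nat) : List Int × List Nat :=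
  if r.getD c 0 = 2 then (p.1.set c (p.1.getD c 0 + 1), p.2 ++ [c]) else p

-- 'for row in board: if not active: break; …'
def pvBLoop (rows : List (List Int)) (counts : List Int) (active : List Nat) : List Int :=
  match rows with
  | [] => counts
  | r :: rest =>
    if active = [] then counts
    else
      let st := active.foldl (pvBStep r) (counts, [])
      pvBLoop rest st.1 st.2

def get_col_index_alt (board : List (List Int)) : List Int :=
  let n := (board.headD []).length
  (pvBLoop board (List.replicate n 0) (List.range n)).map (fun k => (6 : Int) - k)

-- ===== PRECONDITION & SPEC =====
-- Pre_ excludes exactly the inputs on which Python A raises IndexError: the empty board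
-- (board[0]), and ragged boards where some column's run of leading 2s reaches a row too
-- short for that column.
def Pre_get_col_index (board : List (List Int)) : Prop :=
  board ≠ [] ∧ ∀ c < (board.headD []).length, ∀ i < board.length,
    (∀ j < i, c < (board.getD j []).length ∧ (board.getD j []).getD c 0 = 2) →
    c < (board.getD i []).length
instance (board : List (List Int)) : Decidable (Pre_get_col_index board) := by
  unfold Pre_get_col_index; infer_instance

def pvWitness_get_col_index : List (List Int) := [[2, 0], [2, 2], [3, 2]]

def Spec_get_col_index (board : List (List Int)) (out : List Int) : Prop := out = get_col_index_alt board
instance (board : List (List Int)) (out : List Int) : Decidable (Spec_get_col_index board out) := by unfold Spec_get_col_index; infer_instance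

-- ===== CLAIM (what is proved, stated in full; the proofs are below) =====
def Claim_equal_get_col_index : Prop := ∀ (board : List (List Int)), Dom_get_col_index board → Pre_get_col_index board → Spec_get_col_index board (get_col_index board)

-- ===== LEMMAS AND PROOFS =====

-- number of leading rows whose entry at column c is 2
def pvLead (rows : List (List Int)) (c : Nat) : Nat :=
  match rows with
  | [] => 0
  | r :: rest => if r.getD c 0 = 2 then pvLead rest c + 1 else 0

theorem pvAWhile_eq (board : List (List Int)) (col : Nat) :
    ∀ row, pvAWhile board col row = row + pvLead (board.drop row) col := by
  intro row
  induction row using pvAWhile.induct board col with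
  | case1 row h ih =>
    rw [pvAWhile, dif_pos h, ih]
    have hd : board.drop row = board[row] :: board.drop (row + 1) :=
      List.drop_eq_getElem_cons h.1
    have hg : board.getD row [] = board[row] := List.getD_eq_getElem board [] h.1
    rw [hd, pvLead]
    rw [hg] at h
    rw [if_pos h.2]
    omega
  | case2 row h =>
    rw [pvAWhile, dif_neg h]
    by_cases hr : row < board.length
    · have hd : board.drop row = board[row] :: board.drop (row + 1) :=
        List.drop_eq_getElem_cons hr
      have hg : board.getD row [] = board[row] := List.getD_eq_getElem board [] hr
      rw [hd, pvLead]
      have hne : ¬ board[row].getD col 0 = 2 := by rw [← hg]; tauto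
      rw [if_neg hne]; omega
    · rw [List.drop_eq_nil_of_le (by omega), pvLead]; omega

theorem foldl_pvBStep_snd (r : List Int) :
    ∀ (active : List Nat) (counts : List Int) (acc : List Nat),
      (active.foldl (pvBStep r) (counts, acc)).2
        = acc ++ active.filter (fun c => r.getD c 0 = 2) := by
  intro active
  induction active with
  | nil => intro counts acc; simp
  | cons c cs ih =>
    intro counts acc
    simp only [List.foldl_cons, pvBStep, List.filter_cons]
    by_cases h : r.getD c 0 = 2 <;>
      simp only [List.getD_eq_getElem?_getD] at h <;> simp [h, ih]

theorem foldl_pvBStep_fst_len (r : List Int) :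
    ∀ (active : List Nat) (counts : List Int) (acc : List Nat),
      (active.foldl (pvBStep r) (counts, acc)).1.length = counts.length := by
  intro active
  induction active with
  | nil => intro counts acc; simp
  | cons c cs ih =>
    intro counts acc
    simp only [List.foldl_cons, pvBStep]
    by_cases h : r.getD c 0 = 2 <;>
      simp only [List.getD_eq_getElem?_getD] at h <;> simp [h, ih]

theorem foldl_pvBStep_fst_getD (r : List Int) :
    ∀ (active : List Nat) (counts : List Int) (acc : List Nat),
      active.Nodup → (∀ c ∈ active, c < counts.length) →
      ∀ j, (active.foldl (pvBStep r) (counts, acc)).1.getD j 0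
        = counts.getD j 0 + (if j ∈ active ∧ r.getD j 0 = 2 then 1 else 0) := by
  intro active
  induction active with
  | nil => intro counts acc _ _ j; simp
  | cons c cs ih =>
    intro counts acc hnd hb j
    simp only [List.foldl_cons, pvBStep]
    have hcl : c < counts.length := hb c (by simp)
    have hnd' : cs.Nodup := hnd.of_cons
    have hcnot : c ∉ cs := by
      have := List.nodup_cons.mp hnd; exact this.1
    by_cases h : r.getD c 0 = 2
    · rw [if_pos h]
      have hb' : ∀ x ∈ cs, x < (counts.set c (counts.getD c 0 + 1)).length := by
        intro x hx; simpa using hb x (List.mem_cons_of_mem _ hx)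
      rw [ih _ _ hnd' hb']
      by_cases hjc : j = c
      · subst hjc
        have : (counts.set j (counts.getD j 0 + 1)).getD j 0 = counts.getD j 0 + 1 := by
          rw [List.getD_eq_getElem _ _ (by simpa using hcl)]
          simp [List.getElem_set_self]
        rw [this]
        rw [if_neg (fun hc => hcnot hc.1),
          if_pos ⟨List.mem_cons_self, h⟩]
        ring
      · have : (counts.set c (counts.getD c 0 + 1)).getD j 0 = counts.getD j 0 := by
          by_cases hj : j < counts.length
          · rw [List.getD_eq_getElem _ _ (by simpa using hj),
              List.getD_eq_getElem _ _ hj]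
            rw [List.getElem_set]
            rw [if_neg (by omega)]
          · rw [List.getD_eq_default _ _ (by simpa using Nat.le_of_not_lt hj),
              List.getD_eq_default _ _ (Nat.le_of_not_lt hj)]
        rw [this]
        have : (j ∈ c :: cs ∧ r.getD j 0 = 2) ↔ (j ∈ cs ∧ r.getD j 0 = 2) := by
          constructor
          · rintro ⟨hm, h2⟩; rcases List.mem_cons.mp hm with h1 | h1
            · exact absurd h1 hjc
            · exact ⟨h1, h2⟩
          · rintro ⟨hm, h2⟩; exact ⟨List.mem_cons_of_mem _ hm, h2⟩
        simp only [this]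
    · rw [if_neg h]
      rw [ih _ _ hnd' (fun x hx => hb x (List.mem_cons_of_mem _ hx))]
      by_cases hjc : j = c
      · subst hjc
        rw [if_neg (fun hc : _ ∧ _ => h hc.2)]
        simp
        exact h
      · have : (j ∈ c :: cs ∧ r.getD j 0 = 2) ↔ (j ∈ cs ∧ r.getD j 0 = 2) := by
          constructor
          · rintro ⟨hm, h2⟩; rcases List.mem_cons.mp hm with h1 | h1
            · exact absurd h1 hjc
            · exact ⟨h1, h2⟩
          · rintro ⟨hm, h2⟩; exact ⟨List.mem_cons_of_mem _ hm, h2⟩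
        simp only [this]

theorem pvBLoop_len :
    ∀ (rows : List (List Int)) (counts : List Int) (active : List Nat),
      (pvBLoop rows counts active).length = counts.length := by
  intro rows
  induction rows with
  | nil => intro counts active; simp [pvBLoop]
  | cons r rest ih =>
    intro counts active
    rw [pvBLoop]
    by_cases h : active = []
    · simp [h]
    · rw [if_neg h]
      rw [ih, foldl_pvBStep_fst_len]

theorem pvBLoop_getD :
    ∀ (rows : List (List Int)) (counts : List Int) (active : List Nat),
      active.Nodup → (∀ c ∈ active, c < counts.length) →
      ∀ j, (pvBLoop rows counts active).getD j 0
        = counts.getD j 0 + (if j ∈ active then (pvLead rows j : Int) else 0) := by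
  intro rows
  induction rows with
  | nil => intro counts active _ _ j; simp [pvBLoop, pvLead]
  | cons r rest ih =>
    intro counts active hnd hb j
    rw [pvBLoop]
    by_cases h : active = []
    · subst h; simp
    · rw [if_neg h]
      simp only []
      have hsnd := foldl_pvBStep_snd r active counts []
      have hlen := foldl_pvBStep_fst_len r active counts []
      have hfst := foldl_pvBStep_fst_getD r active counts [] hnd hb
      set st := active.foldl (pvBStep r) (counts, []) with hst
      have hnd2 : st.2.Nodup := by rw [hsnd]; simpa using hnd.filter _
      have hb2 : ∀ c ∈ st.2, c < st.1.length := by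
        intro c hc; rw [hlen]
        rw [hsnd] at hc; simp at hc
        exact hb c hc.1
      rw [ih st.1 st.2 hnd2 hb2 j, hfst j]
      have hmem : j ∈ st.2 ↔ j ∈ active ∧ r.getD j 0 = 2 := by
        rw [hsnd]; simp
      by_cases hja : j ∈ active
      · by_cases h2 : r.getD j 0 = 2
        · have : j ∈ st.2 := hmem.mpr ⟨hja, h2⟩
          rw [if_pos ⟨hja, h2⟩, if_pos this, if_pos hja, pvLead, if_pos h2]
          push_cast; ring
        · have : j ∉ st.2 := fun hc => h2 (hmem.mp hc).2
          rw [if_neg (fun hc => h2 hc.2), if_neg this, if_pos hja, pvLead, if_neg h2]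
          simp
      · have : j ∉ st.2 := fun hc => hja (hmem.mp hc).1
        rw [if_neg (fun hc => hja hc.1), if_neg this, if_neg hja]
        ring

-- ===== VERDICT (by name: the statement is the Claim_ definition above) =====
theorem get_col_index_spec : Claim_equal_get_col_index := by
  intro board _ _
  unfold Spec_get_col_index get_col_index get_col_index_alt
  set n := (board.headD []).length with hn
  apply List.ext_getElem
  · simp [pvBLoop_len]
  · intro i hi1 hi2
    simp only [List.getElem_map, List.getElem_range]
    have hi : i < n := by simpa using hi1
    have hlenb : (pvBLoop board (List.replicate n 0) (List.range n)).length = n := by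
      simp [pvBLoop_len]
    have hg := pvBLoop_getD board (List.replicate n 0) (List.range n)
      (List.nodup_range) (by intro c hc; simpa using List.mem_range.mp hc) i
    rw [List.getD_eq_getElem _ _ (by omega)] at hg
    simp only [List.mem_range, hi, if_pos] at hg
    have hrep : (List.replicate n (0 : Int)).getD i 0 = 0 := by
      simp
    rw [hrep] at hg
    rw [hg, pvAWhile_eq board i 0]
    simp
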